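-- pv_equiv track=rewrite | github.com/HaakonEidemHaakstad/BBClassify_Python | new_ui_script.py | merge_quoted_entries
-- ===== SOURCE A (Python) =====
-- def merge_quoted_entries(lst: list[str]):
--     merged_list = []
--     temp = []
--
--     for entry in lst:
--         if entry.startswith('"') and not entry.endswith('"'):
--             temp.append(entry)
--         elif temp:
--             temp.append(entry)
--             if entry.endswith('"'):
--                 merged_list.append(" ".join(temp))
--                 temp = []
--         else:
--             merged_list.append(entry)
--
--     # Handle case where an opening quote is never closed
--     if temp:
--         merged_list.append(" ".join(temp))
--
--     return merged_list
-- ===== SOURCE B (Python) =====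
-- def merge_quoted_entries(lst: list[str]):
--     result = []
--     i = 0
--     n = len(lst)
--     while i < n:
--         tok = lst[i]
--         if tok.startswith('"') and not tok.endswith('"'):
--             j = i + 1
--             while j < n and not lst[j].endswith('"'):
--                 j += 1
--             if j < n:
--                 result.append(" ".join(lst[i:j + 1]))
--                 i = j + 1
--             else:
--                 result.append(" ".join(lst[i:]))
--                 i = n
--         else:
--             result.append(tok)
--             i += 1
--     return result
-- ===== Notes on version B (the rewrite author's own statement) =====
-- stated objective: alternative
-- what changed: Replaced A's single fold carrying a 'temp' accumulator list (with a post-loop flush) by an index-based outer loop that, on seeing an opening quote, scans forward to the first closing token and joins the whole slice at once; no accumulator state survives between tokens.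
import Mathlib
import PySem

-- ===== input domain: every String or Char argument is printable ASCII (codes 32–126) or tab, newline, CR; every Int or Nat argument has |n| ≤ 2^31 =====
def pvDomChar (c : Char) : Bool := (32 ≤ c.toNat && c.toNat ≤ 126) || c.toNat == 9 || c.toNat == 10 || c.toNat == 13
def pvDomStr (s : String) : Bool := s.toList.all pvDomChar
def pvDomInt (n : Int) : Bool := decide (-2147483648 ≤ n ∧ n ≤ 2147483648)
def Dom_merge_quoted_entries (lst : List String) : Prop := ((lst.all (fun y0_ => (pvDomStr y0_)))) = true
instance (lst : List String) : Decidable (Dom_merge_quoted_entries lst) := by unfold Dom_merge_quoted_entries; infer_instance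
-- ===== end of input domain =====

-- B replaces A's temp-accumulator fold by a forward scan-and-join on each opening quote (alternative decomposition, same cost).

-- ===== PORT A =====
def mergeStep (s : List String × List String) (entry : String) : List String × List String :=
  if PySem.Str.startswith entry "\"" && !PySem.Str.endswith entry "\"" then
    (s.1, s.2 ++ [entry])
  else if !s.2.isEmpty then
    let temp' := s.2 ++ [entry]
    if PySem.Str.endswith entry "\"" then (s.1 ++ [PySem.Str.join " " temp'], [])
    else (s.1, temp')
  else (s.1 ++ [entry], s.2)

def merge_quoted_entries (lst : List String) : List String :=
  let r := lst.foldl mergeStep ([], [])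
  if !r.2.isEmpty then r.1 ++ [PySem.Str.join " " r.2] else r.1

-- ===== PORT B =====
-- the inner `while` scan of Source B: split the rest at the first token ending in '"'
def notCloses (t : String) : Bool := !PySem.Str.endswith t "\""

def merge_quoted_entries_alt (lst : List String) : List String :=
  match lst with
  | [] => []
  | tok :: rest =>
    if PySem.Str.startswith tok "\"" && !PySem.Str.endswith tok "\"" then
      let pre := rest.takeWhile notCloses
      match h : rest.dropWhile notCloses with
      | [] => [PySem.Str.join " " (tok :: pre)]
      | c :: rest' =>
        PySem.Str.join " " (tok :: (pre ++ [c])) :: merge_quoted_entries_alt rest'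
    else tok :: merge_quoted_entries_alt rest
termination_by lst.length
decreasing_by
  · have h1 : (rest.dropWhile notCloses).length ≤ rest.length := rest.length_dropWhile_le notCloses
    rw [h] at h1; simp at h1 ⊢; omega
  · simp

-- ===== PRECONDITION & SPEC =====
def Spec_merge_quoted_entries (lst : List String) (out : List String) : Prop := out = merge_quoted_entries_alt lst
instance (lst : List String) (out : List String) : Decidable (Spec_merge_quoted_entries lst out) := by unfold Spec_merge_quoted_entries; infer_instance

-- ===== CLAIM (what is proved, stated in full; the proofs are below) =====
def Claim_equal_merge_quoted_entries : Prop := ∀ (lst : List String), Dom_merge_quoted_entries lst → Spec_merge_quoted_entries lst (merge_quoted_entries lst)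

-- ===== LEMMAS AND PROOFS =====
-- what B does when a quote is open with accumulated tokens `temp` and remaining input `xs`
def flushB (temp xs : List String) : List String :=
  match h : xs.dropWhile notCloses with
  | [] => [PySem.Str.join " " (temp ++ xs.takeWhile notCloses)]
  | c :: rest' =>
    PySem.Str.join " " (temp ++ xs.takeWhile notCloses ++ [c]) :: merge_quoted_entries_alt rest'

def finA (r : List String × List String) : List String :=
  if !r.2.isEmpty then r.1 ++ [PySem.Str.join " " r.2] else r.1


theorem flushB_nc (temp : List String) (x : String) (xs : List String)
    (h : PySem.Chars.endswith x.toList ['"'] = false) :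
    flushB temp (x :: xs) = flushB (temp ++ [x]) xs := by
  have hn : notCloses x = true := by simp [notCloses, h]
  have hd : List.dropWhile notCloses (x :: xs) = List.dropWhile notCloses xs :=
    List.dropWhile_cons_of_pos hn
  have htw : List.takeWhile notCloses (x :: xs) = x :: List.takeWhile notCloses xs :=
    List.takeWhile_cons_of_pos hn
  unfold flushB
  split <;> split <;> simp_all

theorem flushB_cl (temp : List String) (x : String) (xs : List String)
    (h : PySem.Chars.endswith x.toList ['"'] = true) :
    flushB temp (x :: xs) = PySem.Str.join " " (temp ++ [x]) :: merge_quoted_entries_alt xs := by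
  have hn : notCloses x = false := by simp [notCloses, h]
  have hd : List.dropWhile notCloses (x :: xs) = x :: xs := List.dropWhile_cons_of_neg (by simp [hn])
  have htw : List.takeWhile notCloses (x :: xs) = [] := List.takeWhile_cons_of_neg (by simp [hn])
  unfold flushB
  split <;> simp_all

theorem alt_open (x : String) (xs : List String)
    (hs : PySem.Chars.startswith x.toList ['"'] = true)
    (hc : PySem.Chars.endswith x.toList ['"'] = false) :
    merge_quoted_entries_alt (x :: xs) = flushB [x] xs := by
  unfold merge_quoted_entries_alt flushB
  split <;> split <;> simp_all

theorem alt_closed (x : String) (xs : List String)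
    (h : ¬(PySem.Chars.startswith x.toList ['"'] = true ∧ PySem.Chars.endswith x.toList ['"'] = false)) :
    merge_quoted_entries_alt (x :: xs) = x :: merge_quoted_entries_alt xs := by
  rw [merge_quoted_entries_alt.eq_def]
  simp [h]

theorem main_lemma : ∀ (n : ℕ) (xs : List String), xs.length ≤ n →
    (∀ acc, finA (xs.foldl mergeStep (acc, [])) = acc ++ merge_quoted_entries_alt xs) ∧
    (∀ temp acc, temp ≠ [] → finA (xs.foldl mergeStep (acc, temp)) = acc ++ flushB temp xs) := by
  intro n
  induction n with
  | zero =>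
    intro xs hlen
    have hx : xs = [] := List.eq_nil_of_length_eq_zero (Nat.le_zero.mp hlen)
    subst hx
    constructor
    · intro acc; simp [finA, merge_quoted_entries_alt]
    · intro temp acc ht; simp [finA, flushB, ht]
  | succ n ih =>
    intro xs hlen
    cases xs with
    | nil =>
      constructor
      · intro acc; simp [finA, merge_quoted_entries_alt]
      · intro temp acc ht; simp [finA, flushB, ht]
    | cons x xs' =>
      have hlen' : xs'.length ≤ n := by simp at hlen; omega
      obtain ⟨ihc, iho⟩ := ih xs' hlen'
      constructor
      · intro acc
        cases hc : PySem.Chars.endswith x.toList ['"'] with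
        | true =>
          have hstep : mergeStep (acc, []) x = (acc ++ [x], []) := by
            simp [mergeStep, hc]
          rw [List.foldl_cons, hstep, ihc (acc ++ [x]),
            alt_closed x xs' (fun hh => by rw [hc] at hh; cases hh.2), List.append_assoc]
          simp
        | false =>
          cases hs : PySem.Chars.startswith x.toList ['"'] with
          | true =>
            have hstep : mergeStep (acc, []) x = (acc, [x]) := by
              simp [mergeStep, hs, hc]
            rw [List.foldl_cons, hstep, iho [x] acc (by simp), alt_open x xs' hs hc]
          | false =>
            have hstep : mergeStep (acc, []) x = (acc ++ [x], []) := by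
              simp [mergeStep, hs, hc]
            rw [List.foldl_cons, hstep, ihc (acc ++ [x]),
              alt_closed x xs' (fun hh => by rw [hs] at hh; cases hh.1), List.append_assoc]
            simp
      · intro temp acc ht
        cases hc : PySem.Chars.endswith x.toList ['"'] with
        | false =>
          have hstep : mergeStep (acc, temp) x = (acc, temp ++ [x]) := by
            cases hs : PySem.Chars.startswith x.toList ['"'] <;> simp [mergeStep, hs, hc, ht]
          rw [List.foldl_cons, hstep, iho (temp ++ [x]) acc (by simp),
            flushB_nc temp x xs' hc]
        | true =>
          have hstep : mergeStep (acc, temp) x =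
              (acc ++ [PySem.Str.join " " (temp ++ [x])], []) := by
            simp [mergeStep, hc, ht]
          rw [List.foldl_cons, hstep, ihc, flushB_cl temp x xs' hc, List.append_assoc]
          simp

theorem merge_eq (lst : List String) : merge_quoted_entries lst = merge_quoted_entries_alt lst := by
  have := (main_lemma lst.length lst le_rfl).1 []
  simpa [merge_quoted_entries, finA] using this

-- ===== VERDICT (by name: the statement is the Claim_ definition above) =====
theorem merge_quoted_entries_spec : Claim_equal_merge_quoted_entries := by
  intro lst _
  unfold Spec_merge_quoted_entries
  exact merge_eq lst
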